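-- pv_equiv track=rewrite | github.com/Csuarezgurruchaga/chatbot-railway | src/guardrails/validators.py | validar_sin_palabrotas
-- ===== SOURCE A (Python) =====
-- def validar_sin_palabrotas(texto: str) -> bool:
--     """Verifica que no haya vocabulario obsceno"""
--     palabras_prohibidas = [
--         "puto", "puta", "carajo", "concha", "pelotudo", "pelotuda",
--         "boludo", "boluda", "idiota", "estupido", "estupida", "mierda",
--         "cagar", "joder", "coger", "verga", "pija", "choto", "gil",
--         "tarado", "tarada", "forro", "la concha", "negro de mierda",
--         "hijo de puta", "la puta madre", "que se vayan", "villero"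
--     ]
--
--     texto_lower = texto.lower()
--     return not any(palabra in texto_lower for palabra in palabras_prohibidas)
-- ===== SOURCE B (Python) =====
-- # The banned-word list below is shared DATA (it must be byte-identical to the
-- # original validator's list); the algorithm scanning the text is different.
-- _PALABRAS_PROHIBIDAS = [
--     "puto", "puta", "carajo", "concha", "pelotudo", "pelotuda",
--     "boludo", "boluda", "idiota", "estupido", "estupida", "mierda",
--     "cagar", "joder", "coger", "verga", "pija", "choto", "gil",
--     "tarado", "tarada", "forro", "la concha", "negro de mierda",
--     "hijo de puta", "la puta madre", "que se vayan", "villero"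
-- ]
--
--
-- def _tiene_prohibida(t):
--     # position-major scan: walk the text once; at each position test
--     # whether some banned term starts right there
--     i = 0
--     n = len(t)
--     while True:
--         if any(t.startswith(w, i) for w in _PALABRAS_PROHIBIDAS):
--             return True
--         if i >= n:
--             return False
--         i += 1
--
--
-- def validar_sin_palabrotas(texto: str) -> bool:
--     """Verifica que no haya vocabulario obsceno"""
--     return not _tiene_prohibida(texto.lower())
-- ===== Notes on version B (the rewrite author's own statement) =====
-- stated objective: alternative
-- what changed: Replaces the word-major loop of 28 independent whole-text substring scans with a single position-major scan of the text that, at each position, tests whether some banned term starts there.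
import Mathlib
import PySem

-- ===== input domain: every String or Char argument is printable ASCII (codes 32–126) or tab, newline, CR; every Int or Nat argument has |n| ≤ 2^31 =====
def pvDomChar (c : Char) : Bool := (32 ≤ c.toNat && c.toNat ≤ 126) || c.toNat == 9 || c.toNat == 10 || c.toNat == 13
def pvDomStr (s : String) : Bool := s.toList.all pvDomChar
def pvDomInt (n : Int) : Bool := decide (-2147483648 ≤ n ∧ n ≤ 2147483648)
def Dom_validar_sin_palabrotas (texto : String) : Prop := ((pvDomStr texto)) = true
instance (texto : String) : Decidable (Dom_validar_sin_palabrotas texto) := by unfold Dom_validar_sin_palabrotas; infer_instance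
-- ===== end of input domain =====

-- B changes A's word-major loop of 28 substring scans into one position-major scan of
-- the text that tests at each suffix whether a banned term starts there (alternative).

-- ===== PORT A =====
def validar_sin_palabrotas (texto : String) : Bool :=
  let palabras_prohibidas : List String :=
    ["puto", "puta", "carajo", "concha", "pelotudo", "pelotuda", "boludo", "boluda",
     "idiota", "estupido", "estupida", "mierda", "cagar", "joder", "coger", "verga",
     "pija", "choto", "gil", "tarado", "tarada", "forro", "la concha",
     "negro de mierda", "hijo de puta", "la puta madre", "que se vayan", "villero"]
  let texto_lower := PySem.Str.lower texto
  !(palabras_prohibidas.any (fun palabra => PySem.Str.isIn palabra texto_lower))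

-- ===== PORT B =====
def pvWordsB : List (List Char) :=
  ["puto".toList, "puta".toList, "carajo".toList, "concha".toList, "pelotudo".toList,
   "pelotuda".toList, "boludo".toList, "boluda".toList, "idiota".toList,
   "estupido".toList, "estupida".toList, "mierda".toList, "cagar".toList,
   "joder".toList, "coger".toList, "verga".toList, "pija".toList, "choto".toList,
   "gil".toList, "tarado".toList, "tarada".toList, "forro".toList,
   "la concha".toList, "negro de mierda".toList, "hijo de puta".toList,
   "la puta madre".toList, "que se vayan".toList, "villero".toList]

-- _tiene_prohibida: walk the suffixes of the text; at each, test whether a banned term starts there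
def tieneProhibida : List Char → Bool
  | [] => pvWordsB.any (fun w => PySem.Chars.startswith [] w)
  | c :: rest =>
      pvWordsB.any (fun w => PySem.Chars.startswith (c :: rest) w) || tieneProhibida rest

def validar_sin_palabrotas_alt (texto : String) : Bool :=
  !(tieneProhibida (PySem.Chars.lower texto.toList))

-- ===== PRECONDITION & SPEC =====
def Spec_validar_sin_palabrotas (texto : String) (out : Bool) : Prop := out = validar_sin_palabrotas_alt texto
instance (texto : String) (out : Bool) : Decidable (Spec_validar_sin_palabrotas texto out) := by unfold Spec_validar_sin_palabrotas; infer_instance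

-- ===== CLAIM (what is proved, stated in full; the proofs are below) =====
def Claim_equal_validar_sin_palabrotas : Prop := ∀ (texto : String), Dom_validar_sin_palabrotas texto → Spec_validar_sin_palabrotas texto (validar_sin_palabrotas texto)

-- ===== LEMMAS AND PROOFS =====

lemma tieneProhibida_iff (cs : List Char) :
    tieneProhibida cs = true ↔ ∃ w ∈ pvWordsB, w <:+: cs := by
  induction cs with
  | nil => decide
  | cons c rest ih =>
      simp only [tieneProhibida, Bool.or_eq_true, List.any_eq_true,
        PySem.Chars.startswith_iff, ih, List.infix_cons_iff]
      constructor
      · rintro (⟨w, hw, hp⟩ | ⟨w, hw, hi⟩)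
        · exact ⟨w, hw, Or.inl hp⟩
        · exact ⟨w, hw, Or.inr hi⟩
      · rintro ⟨w, hw, hp | hi⟩
        · exact Or.inl ⟨w, hw, hp⟩
        · exact Or.inr ⟨w, hw, hi⟩

lemma pvWordsB_eq : pvWordsB =
    (["puto", "puta", "carajo", "concha", "pelotudo", "pelotuda", "boludo", "boluda",
      "idiota", "estupido", "estupida", "mierda", "cagar", "joder", "coger", "verga",
      "pija", "choto", "gil", "tarado", "tarada", "forro", "la concha",
      "negro de mierda", "hijo de puta", "la puta madre", "que se vayan", "villero"] :
      List String).map String.toList := rfl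

-- ===== VERDICT (by name: the statement is the Claim_ definition above) =====
theorem validar_sin_palabrotas_spec : Claim_equal_validar_sin_palabrotas := by
  intro texto _
  show validar_sin_palabrotas texto = validar_sin_palabrotas_alt texto
  have h : (["puto", "puta", "carajo", "concha", "pelotudo", "pelotuda", "boludo", "boluda",
      "idiota", "estupido", "estupida", "mierda", "cagar", "joder", "coger", "verga",
      "pija", "choto", "gil", "tarado", "tarada", "forro", "la concha",
      "negro de mierda", "hijo de puta", "la puta madre", "que se vayan", "villero"] :
      List String).any (fun palabra => PySem.Str.isIn palabra (PySem.Str.lower texto))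
      = tieneProhibida (PySem.Chars.lower texto.toList) := by
    rw [Bool.eq_iff_iff]
    simp only [List.any_eq_true, PySem.Str.isIn_iff_infix, PySem.Str.toList_lower,
      tieneProhibida_iff, pvWordsB_eq, List.mem_map]
    constructor
    · rintro ⟨p, hp, hi⟩; exact ⟨p.toList, ⟨p, hp, rfl⟩, hi⟩
    · rintro ⟨w, ⟨p, hp, rfl⟩, hi⟩; exact ⟨p, hp, hi⟩
  simp only [validar_sin_palabrotas, validar_sin_palabrotas_alt, h]
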